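-- pv_equiv track=rewrite | github.com/Sherwen2333/CSE101 | lab/lab9/lab9.py | encode_steps
-- ===== SOURCE A (Python) =====
-- def encode_steps(message):
--     if len(message)==1:
--         return message
--     else:
--         z=[]
--         res=[]
--         for i in message:
--             z.append(ord(i))
--         for i in range(len(z)-1):
--             res.append(z[i+1]-z[i])
--         message=list(message)
--         asd=''
--         for i in range(len(message)):
--             asd+=message[i]
--             if i < len(res):
--                 asd+=str(res[i])
--     return asd
-- ===== SOURCE B (Python) =====
-- def encode_steps(message):
--     n = len(message)
--     if n <= 1:
--         return message
--     m = n // 2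
--     left = message[:m]
--     right = message[m:]
--     bridge = str(ord(right[0]) - ord(left[-1]))
--     return encode_steps(left) + bridge + encode_steps(right)
-- ===== Notes on version B (the rewrite author's own statement) =====
-- stated objective: alternative
-- what changed: Replaces A's three sequential table-building passes (ord list, difference list, index loop with string concatenation) by a recursive divide-and-conquer: split the string in half, encode each half independently, and join with the ord-difference across the boundary; correct because the interleaved encoding of a concatenation is the two encodings joined by the boundary difference.
import Mathlib
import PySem

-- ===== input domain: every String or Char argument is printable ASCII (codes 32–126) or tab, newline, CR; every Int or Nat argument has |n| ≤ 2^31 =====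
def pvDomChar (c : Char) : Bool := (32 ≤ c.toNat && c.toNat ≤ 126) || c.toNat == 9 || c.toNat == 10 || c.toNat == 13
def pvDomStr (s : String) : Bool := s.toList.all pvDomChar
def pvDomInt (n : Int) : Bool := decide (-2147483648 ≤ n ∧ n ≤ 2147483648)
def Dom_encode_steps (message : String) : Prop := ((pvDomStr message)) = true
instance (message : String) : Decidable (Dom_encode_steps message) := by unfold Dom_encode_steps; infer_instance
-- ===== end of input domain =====

-- B replaces A's three sequential passes by a divide-and-conquer recursion: split in half,
-- encode each half, join with the boundary ord-difference; objective: alternative.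

-- ===== PORT A =====
def encode_steps (message : String) : String :=
  if (message.toList.length : Int) == 1 then message
  else
    let z : List Int := message.toList.foldl (fun acc c => acc ++ [(c.toNat : Int)]) []
    let res : List Int := (PySem.List.pyRange 0 ((z.length : Int) - 1) 1).foldl
      (fun acc i => acc ++ [PySem.List.pyGetD z (i + 1) 0 - PySem.List.pyGetD z i 0]) []
    let msgList := message.toList
    (PySem.List.pyRange 0 ((msgList.length : Int)) 1).foldl
      (fun acc i =>
        let acc2 := acc ++ (PySem.List.pyGetD msgList i ' ').toString
        if i < (res.length : Int) then acc2 ++ PySem.Int.toStr (PySem.List.pyGetD res i 0)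
        else acc2) ""

-- ===== PORT B =====
-- Source B slices the string with non-negative in-range bounds 0..m..n, so message[:m]/message[m:]
-- are exactly List.take/List.drop on the character list; right[0]/left[-1] are the head of the
-- (nonempty) drop and the last of the (nonempty) take.
def encGo (chars : List Char) : String :=
  if chars.length ≤ 1 then String.ofList chars
  else
    let m := chars.length / 2
    encGo (chars.take m) ++
      PySem.Int.toStr ((((chars.drop m).headD ' ').toNat : Int)
        - (((chars.take m).getLastD ' ').toNat : Int)) ++
      encGo (chars.drop m)
termination_by chars.length
decreasing_by
  · simp only [List.length_take]; omega
  · simp only [List.length_drop]; omega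

def encode_steps_alt (message : String) : String := encGo message.toList

-- ===== PRECONDITION & SPEC =====
def Spec_encode_steps (message : String) (out : String) : Prop := out = encode_steps_alt message
instance (message : String) (out : String) : Decidable (Spec_encode_steps message out) := by unfold Spec_encode_steps; infer_instance

-- ===== CLAIM (what is proved, stated in full; the proofs are below) =====
def Claim_equal_encode_steps : Prop := ∀ (message : String), Dom_encode_steps message → Spec_encode_steps message (encode_steps message)

-- ===== LEMMAS AND PROOFS =====

-- canonical recursive characterisation of the interleaved encoding
def encR : List Char → String
  | [] => ""
  | [c] => c.toString
  | a :: b :: t => a.toString ++ PySem.Int.toStr ((b.toNat : Int) - (a.toNat : Int)) ++ encR (b :: t)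

theorem pv_foldl_shift (l : List String) (init : String) :
    l.foldl (fun r s => r ++ s) init = init ++ l.foldl (fun r s => r ++ s) "" := by
  induction l generalizing init with
  | nil => simp
  | cons a t ih => simp [ih (init ++ a), ih a, String.append_assoc]

theorem pv_join_cons (s : String) (l : List String) :
    String.join (s :: l) = s ++ String.join l := by
  simp only [String.join, List.foldl, String.empty_append]
  exact pv_foldl_shift l s

theorem pv_foldl_str {α : Type} (l : List α) (g : α → String) (init : String) :
    l.foldl (fun acc x => acc ++ g x) init = init ++ String.join (l.map g) := by
  induction l generalizing init with
  | nil => simp [String.join]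
  | cons a t ih =>
    simp only [List.foldl, List.map, pv_join_cons]
    rw [ih (init ++ g a), String.append_assoc]

def pvResf (chars : List Char) : List Int :=
  (PySem.List.pyRange 0 ((chars.length : Int) - 1) 1).map
    (fun i => PySem.List.pyGetD (chars.map (fun c => (c.toNat : Int))) (i + 1) 0
      - PySem.List.pyGetD (chars.map (fun c => (c.toNat : Int))) i 0)

def pvParts (chars : List Char) : List String :=
  let parts := (chars.zip chars.tail).map
    (fun p => p.1.toString ++ PySem.Int.toStr ((p.2.toNat : Int) - (p.1.toNat : Int)))
  if chars.isEmpty then parts else parts ++ [(PySem.List.pyGetD chars (-1) ' ').toString]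

theorem pv_resf_length (chars : List Char) : (pvResf chars).length = chars.length - 1 := by
  simp [pvResf, PySem.List.length_pyRange_one]

theorem pv_resf_get (chars : List Char) (k : ℕ) (hk : k < chars.length - 1) :
    PySem.List.pyGetD (pvResf chars) (k : Int) 0
      = (chars[k + 1]'(by omega)).toNat - ((chars[k]'(by omega)).toNat : Int) := by
  have hn : ((chars.length : Int) - 1) = ((chars.length - 1 : ℕ) : Int) := by omega
  rw [pvResf, hn, PySem.List.pyGetD_map_pyRange _ _ _ _ hk]
  have h1 : ((k : Int) + 1) = ((k + 1 : ℕ) : Int) := by push_cast; ring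
  rw [h1, PySem.List.pyGetD_natCast, PySem.List.pyGetD_natCast]
  simp [List.getD_eq_getElem?_getD, (by omega : k + 1 < chars.length),
    (by omega : k < chars.length)]

theorem pv_list_eq (chars : List Char) :
    (PySem.List.pyRange 0 (chars.length : Int) 1).map
      (fun i => (PySem.List.pyGetD chars i ' ').toString ++
        (if i < (((pvResf chars)).length : Int)
          then PySem.Int.toStr (PySem.List.pyGetD (pvResf chars) i 0) else ""))
    = pvParts chars := by
  rcases eq_or_ne chars [] with h | h
  · subst h
    simp [pvParts, PySem.List.pyRange_one_eq_nil]
  · have hn : 1 ≤ chars.length := List.length_pos_of_ne_nil h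
    have hzip : (chars.zip chars.tail).length = chars.length - 1 := by
      rw [List.length_zip, List.length_tail]; omega
    have hparts : pvParts chars
        = (chars.zip chars.tail).map
            (fun p => p.1.toString ++ PySem.Int.toStr ((p.2.toNat : Int) - (p.1.toNat : Int)))
          ++ [(PySem.List.pyGetD chars (-1) ' ').toString] := by
      simp [pvParts, h]
    rw [hparts]
    apply List.ext_getElem
    · simp [PySem.List.length_pyRange_one, hzip]
      omega
    · intro k h1 h2
      have hk : k < chars.length := by
        simpa [PySem.List.length_pyRange_one] using h1
      simp only [List.getElem_map, PySem.List.getElem_pyRange_one, zero_add]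
      rw [PySem.List.pyGetD_natCast, List.getD_eq_getElem chars ' ' hk, pv_resf_length]
      by_cases hlt : k < chars.length - 1
      · rw [if_pos (by omega), pv_resf_get chars k hlt]
        rw [List.getElem_append_left (by simp only [List.length_map, hzip]; omega)]
        simp [List.getElem_zip, List.getElem_tail]
      · have hke : k = chars.length - 1 := by omega
        rw [if_neg (by omega), String.append_empty]
        rw [List.getElem_append_right (by simp only [List.length_map, hzip]; omega)]
        simp only [List.getElem_singleton]
        rw [PySem.List.pyGetD_neg_one chars ' ' h, List.getLast_eq_getElem]
        simp [hke]

-- A's port equals the joined parts list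
theorem pv_A_join (message : String) (h1 : message.toList.length ≠ 1) :
    encode_steps message = String.join (pvParts message.toList) := by
  simp only [encode_steps]
  rw [if_neg (by simpa using h1)]
  rw [PySem.List.foldl_append_singleton_eq_map, List.nil_append]
  rw [PySem.List.foldl_append_singleton_eq_map, List.nil_append]
  rw [PySem.List.foldl_congr_mem _ _
    (fun acc i => acc ++ ((PySem.List.pyGetD message.toList i ' ').toString ++
      (if i < (((PySem.List.pyRange 0 (((message.toList.map (fun c => (c.toNat : Int))).length : Int) - 1) 1).map
          (fun i => PySem.List.pyGetD (message.toList.map (fun c => (c.toNat : Int))) (i + 1) 0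
            - PySem.List.pyGetD (message.toList.map (fun c => (c.toNat : Int))) i 0)).length : Int)
        then PySem.Int.toStr (PySem.List.pyGetD
          ((PySem.List.pyRange 0 (((message.toList.map (fun c => (c.toNat : Int))).length : Int) - 1) 1).map
            (fun i => PySem.List.pyGetD (message.toList.map (fun c => (c.toNat : Int))) (i + 1) 0
              - PySem.List.pyGetD (message.toList.map (fun c => (c.toNat : Int))) i 0)) i 0)
        else "")))
    ""
    (by
      intro acc x hx
      beta_reduce
      split_ifs with hi
      · rw [String.append_assoc]
      · rw [String.append_empty])]
  rw [pv_foldl_str, String.empty_append]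
  rw [← pv_list_eq]
  simp [pvResf, List.length_map]

-- the joined parts list equals the canonical recursion
theorem pv_join_encR (chars : List Char) : String.join (pvParts chars) = encR chars := by
  induction chars with
  | nil => simp [pvParts, encR, String.join]
  | cons a t ih =>
    cases t with
    | nil =>
      simp [pvParts, encR, String.join, PySem.List.pyGetD_neg_one ([a]) ' ' (by simp)]
      rfl
    | cons b t2 =>
      have hne : (b :: t2 : List Char) ≠ [] := by simp
      have hlast : PySem.List.pyGetD (a :: b :: t2) (-1) ' '
          = PySem.List.pyGetD (b :: t2) (-1) ' ' := by
        rw [PySem.List.pyGetD_neg_one _ ' ' (by simp), PySem.List.pyGetD_neg_one _ ' ' hne]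
        simp [List.getLast_cons]
      have hp : pvParts (a :: b :: t2)
          = (a.toString ++ PySem.Int.toStr ((b.toNat : Int) - (a.toNat : Int))) :: pvParts (b :: t2) := by
        simp only [pvParts, List.tail_cons, List.zip_cons_cons, List.map_cons, List.isEmpty_cons,
          hlast]
        simp
      rw [hp, pv_join_cons, ih, encR, String.append_assoc]

-- the divide-and-conquer recursion also equals the canonical recursion
theorem pv_encR_append (l1 l2 : List Char) (h1 : l1 ≠ []) (h2 : l2 ≠ []) :
    encR (l1 ++ l2) = encR l1 ++
      PySem.Int.toStr (((l2.headD ' ').toNat : Int) - ((l1.getLastD ' ').toNat : Int)) ++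
      encR l2 := by
  induction l1 with
  | nil => exact absurd rfl h1
  | cons x t ih =>
    cases t with
    | nil =>
      cases l2 with
      | nil => exact absurd rfl h2
      | cons y t2 => simp [encR]
    | cons a rest =>
      have ihh := ih (by simp)
      simp only [List.cons_append] at ihh ⊢
      simp only [encR, ihh]
      simp [String.append_assoc]

theorem pv_encGo_eq (chars : List Char) : encGo chars = encR chars := by
  induction chars using encGo.induct with
  | case1 chars h =>
    rw [encGo, if_pos h]
    interval_cases hl : chars.length
    · rw [List.length_eq_zero_iff.mp hl]; rfl
    · obtain ⟨c, hc⟩ := List.length_eq_one_iff.mp hl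
      subst hc
      simp only [encR]
      rfl
  | case2 chars h m ih1 ih2 =>
    rw [encGo, if_neg h]
    have hlen : 2 ≤ chars.length := by omega
    dsimp only
    rw [ih1, ih2, ← pv_encR_append _ _
      (List.ne_nil_of_length_pos (by rw [List.length_take]; omega))
      (List.ne_nil_of_length_pos (by rw [List.length_drop]; omega))]
    rw [List.take_append_drop]

theorem pv_main (message : String) : encode_steps message = encode_steps_alt message := by
  unfold encode_steps_alt
  rw [pv_encGo_eq]
  by_cases h1 : message.toList.length = 1
  · obtain ⟨c, hc⟩ := List.length_eq_one_iff.mp h1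
    simp only [encode_steps]
    rw [if_pos (by simpa using h1), hc, encR]
    rw [← String.toList_inj]
    simp [Char.toString, hc, String.singleton]
  · rw [pv_A_join message h1, pv_join_encR]

-- ===== VERDICT (by name: the statement is the Claim_ definition above) =====
theorem encode_steps_spec : Claim_equal_encode_steps := by
  intro message _
  unfold Spec_encode_steps
  exact pv_main message
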